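-- pv_equiv track=rewrite | github.com/sysbio-vo/DBG-GNN | src/create_dbgs_cli.py | kmer_to_index
-- ===== SOURCE A (Python) =====
-- DNA_ALPHABET = ('A', 'T', 'G', 'C')
--
-- DNA5_ALPHABET = ('A', 'T', 'G', 'C', 'N')
--
-- def kmer_to_index(kmer: str, skip_N: bool = True) -> int:
--     """Converts a kmer (string) to an index.
--     """
--     if skip_N:
--         alphabet = DNA_ALPHABET
--     else:
--         alphabet = DNA5_ALPHABET
--
--     base_to_index = {k: v for v, k in enumerate(alphabet)}
--
--     index = 0
--     num_bases = len(alphabet)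
--     for char in kmer:
--         index = num_bases * index + base_to_index[char]
--     return index
-- ===== SOURCE B (Python) =====
-- DNA_ALPHABET = ('A', 'T', 'G', 'C')
--
-- DNA5_ALPHABET = ('A', 'T', 'G', 'C', 'N')
--
-- def kmer_to_index(kmer: str, skip_N: bool = True) -> int:
--     """Converts a kmer (string) to an index.
--
--     Positional-notation formulation: each character contributes
--     digit * num_bases ** (position weight from the right); the result is the
--     sum of these independent terms (no running accumulator carried between
--     characters).
--     """
--     if skip_N:
--         alphabet = DNA_ALPHABET
--     else:
--         alphabet = DNA5_ALPHABET
--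
--     base_to_index = {k: v for v, k in enumerate(alphabet)}
--
--     num_bases = len(alphabet)
--     k = len(kmer)
--     return sum(base_to_index[c] * num_bases ** (k - 1 - i) for i, c in enumerate(kmer))
-- ===== Notes on version B (the rewrite author's own statement) =====
-- stated objective: alternative
-- what changed: Replaces Horner's stateful accumulation (index = num_bases*index + digit) with a closed positional-notation sum: each character contributes digit * num_bases**(k-1-i) independently, summed over enumerate(kmer).
import Mathlib
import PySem

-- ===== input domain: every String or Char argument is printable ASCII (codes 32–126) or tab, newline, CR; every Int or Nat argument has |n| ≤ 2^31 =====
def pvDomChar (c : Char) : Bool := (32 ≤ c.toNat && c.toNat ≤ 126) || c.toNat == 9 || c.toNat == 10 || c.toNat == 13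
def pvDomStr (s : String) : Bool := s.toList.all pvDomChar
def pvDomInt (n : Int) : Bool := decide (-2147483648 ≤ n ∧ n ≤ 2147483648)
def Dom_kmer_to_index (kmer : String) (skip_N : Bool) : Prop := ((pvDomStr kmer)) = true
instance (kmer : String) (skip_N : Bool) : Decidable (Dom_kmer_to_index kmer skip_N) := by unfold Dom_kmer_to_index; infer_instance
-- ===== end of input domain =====

-- B replaces Horner's stateful accumulation by a closed positional-notation sum of digit * base^(k-1-i) terms (alternative decomposition, same cost).

-- ===== PORT A =====
-- alphabet selection and the dict comprehension {k: v for v, k in enumerate(alphabet)}, shared verbatim by both Pythons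
def kmerAlphabet (skip_N : Bool) : List Char :=
  if skip_N then ['A', 'T', 'G', 'C'] else ['A', 'T', 'G', 'C', 'N']

def baseToIndex (skip_N : Bool) : PySem.Dict Char Int :=
  (PySem.List.enumerate (kmerAlphabet skip_N)).foldl (fun d p => d.insert p.2 p.1) PySem.Dict.empty

def kmer_to_index (kmer : String) (skip_N : Bool) : Int :=
  let alphabet := kmerAlphabet skip_N
  let d := baseToIndex skip_N
  let num_bases : Int := alphabet.length
  -- base_to_index[char] raises KeyError on a missing key; total form getD is exact only under Pre_
  kmer.toList.foldl (fun index char => num_bases * index + d.getD char 0) 0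

-- ===== PORT B =====
def kmer_to_index_alt (kmer : String) (skip_N : Bool) : Int :=
  let alphabet := kmerAlphabet skip_N
  let d := baseToIndex skip_N
  let num_bases : Int := alphabet.length
  let k : Int := kmer.toList.length
  -- sum(base_to_index[c] * num_bases ** (k - 1 - i) for i, c in enumerate(kmer)); the exponent is ≥ 0 for every i < k
  ((PySem.List.enumerate kmer.toList).map
    (fun p => d.getD p.2 0 * num_bases ^ (k - 1 - p.1).toNat)).sum

-- ===== PRECONDITION & SPEC =====
-- Pre_ excludes exactly the inputs on which Python A raises KeyError: a character outside the chosen alphabet.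
def Pre_kmer_to_index (kmer : String) (skip_N : Bool) : Prop :=
  kmer.toList.all (fun c => c ∈ kmerAlphabet skip_N) = true
instance (kmer : String) (skip_N : Bool) : Decidable (Pre_kmer_to_index kmer skip_N) := by
  unfold Pre_kmer_to_index; infer_instance

def pvWitness_kmer_to_index : String × Bool := ("GATTACA", true)

def Spec_kmer_to_index (kmer : String) (skip_N : Bool) (out : Int) : Prop := out = kmer_to_index_alt kmer skip_N
instance (kmer : String) (skip_N : Bool) (out : Int) : Decidable (Spec_kmer_to_index kmer skip_N out) := by unfold Spec_kmer_to_index; infer_instance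

-- ===== CLAIM (what is proved, stated in full; the proofs are below) =====
def Claim_equal_kmer_to_index : Prop := ∀ (kmer : String) (skip_N : Bool), Dom_kmer_to_index kmer skip_N → Pre_kmer_to_index kmer skip_N → Spec_kmer_to_index kmer skip_N (kmer_to_index kmer skip_N)

-- ===== LEMMAS AND PROOFS =====
-- Horner's fold equals the positional sum, for any digit map f and base n, by reverse induction
theorem horner_eq_positional (f : Char → Int) (n : Int) (l : List Char) :
    l.foldl (fun i c => n * i + f c) 0
      = ((PySem.List.enumerate l).map
          (fun p => f p.2 * n ^ ((l.length : Int) - 1 - p.1).toNat)).sum := by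
  induction l using List.reverseRecOn with
  | nil => simp [PySem.List.enumerate_nil]
  | append_singleton l' c ih =>
      rw [List.foldl_append, List.foldl_cons, List.foldl_nil,
        PySem.List.enumerate_append, List.map_append, List.sum_append, ih]
      have hmap : ∀ p ∈ PySem.List.enumerate l',
          f p.2 * n ^ (((l' ++ [c]).length : Int) - 1 - p.1).toNat
            = n * (f p.2 * n ^ ((l'.length : Int) - 1 - p.1).toNat) := by
        intro p hp
        obtain ⟨k, hk, rfl⟩ := (PySem.List.mem_enumerate_iff _ _ _).1 hp
        have h1 : (((l' ++ [c]).length : Int) - 1 - (0 + (k : Int))).toNat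
            = ((l'.length : Int) - 1 - (0 + (k : Int))).toNat + 1 := by
          simp only [List.length_append, List.length_cons, List.length_nil]
          omega
        rw [h1, pow_succ]
        ring
      rw [List.map_congr_left hmap, List.sum_map_mul_left]
      simp only [PySem.List.enumerate_cons, PySem.List.enumerate_nil, List.map_cons, List.map_nil,
        List.sum_cons, List.sum_nil, List.length_append, List.length_cons, List.length_nil]
      rw [show (((l'.length + (0 + 1) : Nat) : Int) - 1 - (0 + (l'.length : Int))).toNat = 0 from by
        push_cast; omega]
      ring

-- ===== VERDICT (by name: the statement is the Claim_ definition above) =====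
theorem kmer_to_index_spec : Claim_equal_kmer_to_index := by
  intro kmer skip_N _ _
  unfold Spec_kmer_to_index kmer_to_index kmer_to_index_alt
  exact horner_eq_positional _ _ _
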